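-- pv_equiv track=rewrite | github.com/repeale/fp-go | generators/generators.py | compose_test
-- ===== SOURCE A (Python) =====
-- def compose_test(n: int) -> str:
-- 	funcs = ["add1", "double"]
-- 	fns = ", ".join(funcs[i % 2] for i in range(n))
--
-- 	expect = 0
-- 	for i in range(n-1, -1, -1):
-- 		if i % 2 == 0:
-- 			expect += 1
-- 		else:
-- 			expect *= 2
--
-- 	return f"""
-- func TestCompose{n}_Example(t *testing.T) {{
--     res := Compose{n}({fns})(0)
--     if res != {expect} {{
--         t.Error("Should perform right-to-left function composition of {n} functions. Received:", res)
--     }}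
-- }}"""
-- ===== SOURCE B (Python) =====
-- def compose_test(n: int) -> str:
-- 	m = max(n, 0)
-- 	k = (m + 1) // 2
-- 	fns = ", ".join((["add1", "double"] * k)[:m])
-- 	expect = 2 ** k - 1
--
-- 	return f"""
-- func TestCompose{n}_Example(t *testing.T) {{
--     res := Compose{n}({fns})(0)
--     if res != {expect} {{
--         t.Error("Should perform right-to-left function composition of {n} functions. Received:", res)
--     }}
-- }}"""
-- ===== Notes on version B (the rewrite author's own statement) =====
-- stated objective: faster
-- what changed: The backward alternating add1/double accumulation loop is replaced by the closed form 2**((max(n,0)+1)//2) - 1, and the per-index alternation generator by slicing a replicated [add1, double] pattern.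
import Mathlib
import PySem

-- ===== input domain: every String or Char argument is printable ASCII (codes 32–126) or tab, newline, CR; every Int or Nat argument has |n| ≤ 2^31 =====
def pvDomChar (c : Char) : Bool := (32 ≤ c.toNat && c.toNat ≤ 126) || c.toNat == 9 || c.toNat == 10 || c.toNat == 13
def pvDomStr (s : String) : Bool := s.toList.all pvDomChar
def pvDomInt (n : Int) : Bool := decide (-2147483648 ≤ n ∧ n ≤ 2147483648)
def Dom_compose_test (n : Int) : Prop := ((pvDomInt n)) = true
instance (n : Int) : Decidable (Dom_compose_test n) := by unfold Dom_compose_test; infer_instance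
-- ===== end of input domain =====

-- B replaces A's backward add1/double accumulation loop by the closed form 2^((max(n,0)+1)//2) - 1
-- and the per-index alternation generator by slicing a replicated ["add1","double"] pattern (objective: simpler).

-- ===== PORT A =====
def compose_test (n : Int) : String :=
  let funcs : List String := ["add1", "double"]
  let fns : String := PySem.Str.join ", "
    ((PySem.List.pyRange 0 n 1).map
      (fun i => (PySem.List.pyGet? funcs (PySem.Int.mod i 2)).getD ""))  -- index 0/1 always in range
  let expect : Int := (PySem.List.pyRange (n - 1) (-1) (-1)).foldl
    (fun e i => if PySem.Int.mod i 2 = 0 then e + 1 else e * 2) 0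
  "\nfunc TestCompose" ++ PySem.Int.toStr n ++ "_Example(t *testing.T) {\n    res := Compose"
    ++ PySem.Int.toStr n ++ "(" ++ fns ++ ")(0)\n    if res != " ++ PySem.Int.toStr expect
    ++ " {\n        t.Error(\"Should perform right-to-left function composition of "
    ++ PySem.Int.toStr n ++ " functions. Received:\", res)\n    }\n}"

-- ===== PORT B =====
def compose_test_alt (n : Int) : String :=
  let m : Int := max n 0
  let k : Int := PySem.Int.floordiv (m + 1) 2
  let fns : String := PySem.Str.join ", "
    (PySem.List.slice ((List.replicate k.toNat (["add1", "double"] : List String)).flatten)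
      none (some m))
  let expect : Int := 2 ^ k.toNat - 1
  "\nfunc TestCompose" ++ PySem.Int.toStr n ++ "_Example(t *testing.T) {\n    res := Compose"
    ++ PySem.Int.toStr n ++ "(" ++ fns ++ ")(0)\n    if res != " ++ PySem.Int.toStr expect
    ++ " {\n        t.Error(\"Should perform right-to-left function composition of "
    ++ PySem.Int.toStr n ++ " functions. Received:\", res)\n    }\n}"

-- ===== PRECONDITION & SPEC =====
def Spec_compose_test (n : Int) (out : String) : Prop := out = compose_test_alt n
instance (n : Int) (out : String) : Decidable (Spec_compose_test n out) := by unfold Spec_compose_test; infer_instance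

-- ===== CLAIM (what is proved, stated in full; the proofs are below) =====
def Claim_equal_compose_test : Prop := ∀ (n : Int), Dom_compose_test n → Spec_compose_test n (compose_test n)

-- ===== LEMMAS AND PROOFS =====

lemma flatten_replicate_pair (q : Nat) :
    (List.replicate q (["add1", "double"] : List String)).flatten
      = (List.range (2 * q)).map (fun k : Nat => if k % 2 = 0 then "add1" else "double") := by
  induction q with
  | zero => simp
  | succ q ih =>
    rw [List.replicate_succ', List.flatten_append, ih]
    have h2 : 2 * (q + 1) = (2 * q + 1) + 1 := by omega
    rw [h2, List.range_succ, List.range_succ]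
    simp [Nat.add_mod, Nat.mul_mod_right]

lemma fns_lists_eq (m : Nat) :
    (List.range m).map (fun k : Nat => if k % 2 = 0 then "add1" else "double")
      = List.take m ((List.replicate ((m + 1) / 2) (["add1", "double"] : List String)).flatten) := by
  rw [flatten_replicate_pair, ← List.map_take, List.take_range]
  have h : min m (2 * ((m + 1) / 2)) = m := by omega
  rw [h]

lemma expect_loop_eq (m : Nat) (init : Int) :
    (PySem.List.pyRange ((m : Int) - 1) (-1) (-1)).foldl
        (fun e i => if PySem.Int.mod i 2 = 0 then e + 1 else e * 2) init
      = init * 2 ^ (m / 2) + (2 ^ ((m + 1) / 2) - 1) := by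
  induction m generalizing init with
  | zero => rw [PySem.List.pyRange_neg_one_eq_nil (by norm_num)]; simp
  | succ m ih =>
    have hc : ((m + 1 : Nat) : Int) - 1 = (m : Int) := by omega
    rw [hc, PySem.List.pyRange_neg_one_cons (by omega), List.foldl_cons, ih]
    have hmod : PySem.Int.mod (m : Int) 2 = ((m % 2 : Nat) : Int) := by
      exact_mod_cast PySem.Int.mod_natCast m 2
    rcases Nat.even_or_odd m with ⟨q, hq⟩ | ⟨q, hq⟩
    · have h0 : m % 2 = 0 := by omega
      have e1 : m / 2 = q := by omega
      have e2 : (m + 1) / 2 = q := by omega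
      have e3 : (m + 1 + 1) / 2 = q + 1 := by omega
      have hd : (2 : Int) ∣ (m : Int) := ⟨q, by omega⟩
      simp [hd, e1, e2, e3, pow_succ]; ring
    · have h0 : m % 2 = 1 := by omega
      have e1 : m / 2 = q := by omega
      have e2 : (m + 1) / 2 = q + 1 := by omega
      have e3 : (m + 1 + 1) / 2 = q + 1 := by omega
      have hd : ¬ (2 : Int) ∣ (m : Int) := by
        omega
      simp [hd, e1, e2, e3, pow_succ]; ring

lemma alt_fun_eq (k : Nat) :
    (PySem.List.pyGet? (["add1", "double"] : List String) (PySem.Int.mod (k : Int) 2)).getD ""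
      = if k % 2 = 0 then "add1" else "double" := by
  have hmod : PySem.Int.mod (k : Int) 2 = ((k % 2 : Nat) : Int) := by
    exact_mod_cast PySem.Int.mod_natCast k 2
  have h2 : k % 2 = 0 ∨ k % 2 = 1 := by omega
  rcases h2 with h | h <;> rw [hmod, h] <;> decide

theorem main_eq (n : Int) : compose_test n = compose_test_alt n := by
  unfold compose_test compose_test_alt
  by_cases hn : n ≤ 0
  · have hmax : max n 0 = 0 := by omega
    have hr1 : PySem.List.pyRange 0 n 1 = [] := PySem.List.pyRange_one_eq_nil hn
    have hr2 : PySem.List.pyRange (n - 1) (-1) (-1) = [] :=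
      PySem.List.pyRange_neg_one_eq_nil (by omega)
    simp [hmax, hr1, hr2, pysem]
  · have hm : n = ((n.toNat : Nat) : Int) := by omega
    generalize hmm : n.toNat = m at hm
    have hmax : max n 0 = n := by omega
    have hk : PySem.Int.floordiv (n + 1) 2 = (((m + 1) / 2 : Nat) : Int) := by
      rw [hm]; exact_mod_cast PySem.Int.floordiv_natCast (m + 1) 2
    have hfa : ∀ k : Nat, (PySem.List.pyGet? (["add1", "double"] : List String)
          (PySem.Int.mod ((k : Int)) 2)).getD "" = (fun k : Nat => if k % 2 = 0 then "add1" else "double") k :=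
      alt_fun_eq
    rw [hm] at hk hmax ⊢
    simp only [hmax, hk, PySem.List.pyRange_zero_natCast, List.map_map,
        PySem.List.slice_to_natCast, Int.toNat_natCast, Function.comp_def, hfa,
        expect_loop_eq]
    rw [fns_lists_eq m]
    norm_num


-- ===== VERDICT (by name: the statement is the Claim_ definition above) =====
theorem compose_test_spec : Claim_equal_compose_test := by
  intro n _
  show compose_test n = compose_test_alt n
  exact main_eq n
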